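-- pv_equiv track=rewrite | github.com/RaggedR/rsk-transformer | rsk.py | burge_inverse_rule
-- ===== SOURCE A (Python) =====
-- def partition_conjugate(lam: list[int]) -> list[int]:
--     """Transpose a partition: row lengths → column lengths (and vice versa)."""
--     if not lam:
--         return []
--     return [sum(1 for part in lam if part > j) for j in range(lam[0])]
--
-- def burge_inverse_rule(
--     alpha: list[int], beta: list[int], lam: list[int],
-- ) -> tuple[int, list[int]]:
--     """
--     Burge inverse local rule: 𝔇_{α,β}(λ) = (m, μ).
--
--     Given border partitions α, β and output partition λ, recover the
--     non-negative integer m and input partition μ.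
--     Uses 1-indexed column arithmetic internally (thesis §2.2.10).
--     """
--     alpha_conj = partition_conjugate(alpha) if alpha else []
--     beta_conj = partition_conjugate(beta) if beta else []
--     lam_conj = partition_conjugate(lam) if lam else []
--
--     max_cols = max(len(alpha_conj), len(beta_conj), len(lam_conj), 1)
--     ac = alpha_conj + [0] * (max_cols - len(alpha_conj))
--     bc = beta_conj + [0] * (max_cols - len(beta_conj))
--     lc = lam_conj + [0] * (max_cols - len(lam_conj))
--
--     A_bar = {j + 1 for j in range(max_cols) if lc[j] > ac[j]}
--     B_bar = {j + 1 for j in range(max_cols) if lc[j] > bc[j]}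
--
--     AB_bar = A_bar | B_bar
--     AB_bar_inter = sorted(A_bar & B_bar, reverse=True)  # decreasing order
--
--     # δ: each i ∈ Ā∩B̄ → largest < i not in Ā∪B̄∪used
--     used: set[int] = set()
--     C_bar: set[int] = set()
--     m = 0
--     for i in AB_bar_inter:
--         delta = i - 1
--         while delta > 0 and (delta in AB_bar or delta in used):
--             delta -= 1
--         if delta > 0:
--             C_bar.add(delta)
--             used.add(delta)
--         else:
--             m += 1
--
--     # μ = λ minus one box from bottom of each column in Ā∪B̄∪C̄
--     remove_cols = A_bar | B_bar | C_bar
--     mu_conj: list[int] = []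
--     for j_0 in range(len(lc)):
--         val = lc[j_0]
--         if (j_0 + 1) in remove_cols:
--             val -= 1
--         mu_conj.append(val)
--
--     while mu_conj and mu_conj[-1] == 0:
--         mu_conj.pop()
--
--     mu = partition_conjugate(mu_conj) if mu_conj else []
--     return m, mu
-- ===== SOURCE B (Python) =====
-- def partition_conjugate(lam: list[int]) -> list[int]:
--     """Transpose a partition: row lengths -> column lengths (and vice versa)."""
--     if not lam:
--         return []
--     return [sum(1 for part in lam if part > j) for j in range(lam[0])]
--
-- def burge_inverse_rule(alpha, beta, lam):
--     """Burge inverse local rule, single descending sweep over columns.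
--
--     Instead of building sets and scanning downward for each column of the
--     intersection (quadratic), walk the columns once from the top with a
--     counter of still-unmatched intersection columns: an intersection column
--     increments it, a free column with a positive counter absorbs one (that is
--     exactly the 'largest free column below' of the greedy rule), and every
--     column that loses a box is recorded on the fly.  m is the counter left
--     at the bottom.
--     """
--     ac = partition_conjugate(alpha)
--     bc = partition_conjugate(beta)
--     lc = partition_conjugate(lam)
--     n = max(len(ac), len(bc), len(lc), 1)
--     ac += [0] * (n - len(ac))
--     bc += [0] * (n - len(bc))
--     lc += [0] * (n - len(lc))
--
--     pending = 0
--     mu_rev = []  # mu's conjugate, top column first, trailing zeros skipped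
--     for j in range(n - 1, -1, -1):
--         v = lc[j]
--         in_a = v > ac[j]
--         in_b = v > bc[j]
--         if in_a and in_b:
--             pending += 1
--             v -= 1
--         elif in_a or in_b:
--             v -= 1
--         elif pending:
--             pending -= 1
--             v -= 1
--         if v or mu_rev:
--             mu_rev.append(v)
--     mu_rev.reverse()
--     return pending, partition_conjugate(mu_rev)
-- ===== Notes on version B (the rewrite author's own statement) =====
-- stated objective: faster
-- what changed: Replaces A's per-intersection downward scans over a used-set (plus set unions and a sort) by one descending sweep over the columns with a pending counter that performs the greedy free-column matching and builds mu's conjugate on the fly.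
import Mathlib
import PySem

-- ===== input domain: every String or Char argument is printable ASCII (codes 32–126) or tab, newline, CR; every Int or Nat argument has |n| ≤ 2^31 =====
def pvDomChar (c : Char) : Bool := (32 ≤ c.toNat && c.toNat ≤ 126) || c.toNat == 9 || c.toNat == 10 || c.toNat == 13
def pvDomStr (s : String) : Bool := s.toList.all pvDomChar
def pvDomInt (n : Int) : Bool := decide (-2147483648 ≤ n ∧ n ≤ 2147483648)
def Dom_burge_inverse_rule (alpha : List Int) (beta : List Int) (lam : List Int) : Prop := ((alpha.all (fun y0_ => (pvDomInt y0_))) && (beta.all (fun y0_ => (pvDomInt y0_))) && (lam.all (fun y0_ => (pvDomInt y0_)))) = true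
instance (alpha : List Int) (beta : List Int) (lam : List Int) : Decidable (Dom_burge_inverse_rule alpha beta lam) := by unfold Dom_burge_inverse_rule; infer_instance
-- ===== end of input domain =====

-- B replaces A's quadratic per-intersection downward scans (with a used-set, set unions and
-- a sort) by one linear descending sweep over the columns with a pending counter; the proof
-- shows the greedy "largest free column below" assignment equals that sweep.

-- ===== PORT A =====
-- shared helper: partition_conjugate (identical in Source A and Source B)
def partition_conjugate_port (lam : List Int) : List Int :=
  if lam = [] then []
  else (PySem.List.pyRange 0 (lam.headD 0) 1).map
    (fun j => lam.foldl (fun acc part => if part > j then acc + 1 else acc) 0)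

-- the inner `while delta > 0 and (delta in AB_bar or delta in used): delta -= 1`
def pvFindDelta (mem : Int → Bool) : Nat → Int
  | 0 => 0
  | d+1 => if mem ((d : Int) + 1) then pvFindDelta mem d else ((d : Int) + 1)

-- the `for i in AB_bar_inter:` loop, state (used, C_bar, m)
def pvDeltaLoop (abMem : Int → Bool) :
    List Int → (PySem.Set Int × PySem.Set Int × Int) → (PySem.Set Int × PySem.Set Int × Int)
  | [], st => st
  | i :: rest, (used, cbar, m) =>
    let d := pvFindDelta (fun x => abMem x || PySem.Set.contains used x) (i - 1).toNat
    if 0 < d then pvDeltaLoop abMem rest (PySem.Set.add used d, PySem.Set.add cbar d, m)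
    else pvDeltaLoop abMem rest (used, cbar, m + 1)

def burge_inverse_rule (alpha : List Int) (beta : List Int) (lam : List Int) : Int × List Int :=
  let alphaConj := if alpha ≠ [] then partition_conjugate_port alpha else []
  let betaConj := if beta ≠ [] then partition_conjugate_port beta else []
  let lamConj := if lam ≠ [] then partition_conjugate_port lam else []
  let maxCols := max (max (max alphaConj.length betaConj.length) lamConj.length) 1
  let ac := alphaConj ++ List.replicate (maxCols - alphaConj.length) 0
  let bc := betaConj ++ List.replicate (maxCols - betaConj.length) 0
  let lc := lamConj ++ List.replicate (maxCols - lamConj.length) 0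
  -- Python indexes its lists in O(1); the padded lists are read through arrays (exact)
  let acA := ac.toArray
  let bcA := bc.toArray
  let lcA := lc.toArray
  let aBar : PySem.Set Int := PySem.Set.ofList ((List.range maxCols).filterMap
    (fun (j : Nat) => if lcA.getD j 0 > acA.getD j 0 then some ((j : Int) + 1) else none))
  let bBar : PySem.Set Int := PySem.Set.ofList ((List.range maxCols).filterMap
    (fun (j : Nat) => if lcA.getD j 0 > bcA.getD j 0 then some ((j : Int) + 1) else none))
  -- membership in AB_bar = A_bar | B_bar (a set of columns ⊆ [1, maxCols]) is ported as an
  -- O(1) flag array; exact, since x ∈ AB_bar ↔ 1 ≤ x ≤ maxCols and column x is marked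
  let abFlag : Array Bool := ((List.range maxCols).map
    (fun j => decide (lcA.getD j 0 > acA.getD j 0) || decide (lcA.getD j 0 > bcA.getD j 0))).toArray
  let abInter := PySem.List.sorted (PySem.Set.inter aBar bBar) (fun x => x) true
  let loopRes := pvDeltaLoop
    (fun x => if 1 ≤ x ∧ x ≤ (maxCols : Int) then abFlag.getD (x - 1).toNat false else false)
    abInter (PySem.Set.empty, PySem.Set.empty, 0)
  let removeCols := PySem.Set.union (PySem.Set.union aBar bBar) loopRes.2.1
  let muConj := (List.range lcA.size).map
    (fun (j : Nat) => lcA.getD j 0 - (if PySem.Set.contains removeCols ((j : Int) + 1) then 1 else 0))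
  let muConj' := (muConj.reverse.dropWhile (fun v => v == 0)).reverse
  let mu := if muConj' ≠ [] then partition_conjugate_port muConj' else []
  (loopRes.2.2, mu)

-- ===== PORT B =====
-- the `for j in range(n - 1, -1, -1):` sweep, state (pending, mu_rev)
def pvScanCols (ac bc lc : Array Int) : Nat → Int × List Int → Int × List Int
  | 0, st => st
  | j+1, st =>
    let pending := st.1
    let muRev := st.2
    let v := lc.getD j 0
    let ina := v > ac.getD j 0
    let inb := v > bc.getD j 0
    let pv : Int × Int :=
      if ina ∧ inb then (pending + 1, v - 1)
      else if ina ∨ inb then (pending, v - 1)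
      else if 0 < pending then (pending - 1, v - 1)
      else (pending, v)
    pvScanCols ac bc lc j (pv.1, if pv.2 ≠ 0 ∨ muRev ≠ [] then muRev ++ [pv.2] else muRev)

def burge_inverse_rule_alt (alpha : List Int) (beta : List Int) (lam : List Int) : Int × List Int :=
  let ac0 := partition_conjugate_port alpha
  let bc0 := partition_conjugate_port beta
  let lc0 := partition_conjugate_port lam
  let n := max (max (max ac0.length bc0.length) lc0.length) 1
  let ac := ac0 ++ List.replicate (n - ac0.length) 0
  let bc := bc0 ++ List.replicate (n - bc0.length) 0
  let lc := lc0 ++ List.replicate (n - lc0.length) 0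
  -- Python indexes its lists in O(1); the padded lists are read through arrays (exact)
  let res := pvScanCols ac.toArray bc.toArray lc.toArray n (0, [])
  (res.1, partition_conjugate_port res.2.reverse)

-- ===== PRECONDITION & SPEC =====
def Spec_burge_inverse_rule (alpha : List Int) (beta : List Int) (lam : List Int) (out : Int × List Int) : Prop := out = burge_inverse_rule_alt alpha beta lam
instance (alpha : List Int) (beta : List Int) (lam : List Int) (out : Int × List Int) : Decidable (Spec_burge_inverse_rule alpha beta lam out) := by unfold Spec_burge_inverse_rule; infer_instance

-- ===== CLAIM (what is proved, stated in full; the proofs are below) =====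
def Claim_equal_burge_inverse_rule : Prop := ∀ (alpha : List Int) (beta : List Int) (lam : List Int), Dom_burge_inverse_rule alpha beta lam → Spec_burge_inverse_rule alpha beta lam (burge_inverse_rule alpha beta lam)

-- ===== LEMMAS AND PROOFS =====

-- ---- generic helpers ----

-- ascending list of 1-based columns k+1 (k < n) whose status satisfies q
def pvAscList (q : Nat → Prop) [DecidablePred q] (n : Nat) : List Int :=
  (List.range n).filterMap (fun k => if q k then some ((k : Int) + 1) else none)

-- reference greedy matching: I = intersection columns descending, F = free columns
-- descending; each i takes the largest free < i; returns (matched frees, failures)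
def pvMerge : List Int → List Int → List Int × Nat
  | [], _ => ([], 0)
  | i :: I, F =>
    match F.dropWhile (fun f => decide (i ≤ f)) with
    | [] => ((pvMerge I []).1, (pvMerge I []).2 + 1)
    | f :: F' => (f :: (pvMerge I F').1, (pvMerge I F').2)

-- pvMerge preceded by p pending intersections lying above every listed column
def pvMergeP : Nat → List Int → List Int → List Int × Nat
  | 0, I, F => pvMerge I F
  | p+1, I, [] => ((pvMergeP p I []).1, (pvMergeP p I []).2 + 1)
  | p+1, I, f :: F => (f :: (pvMergeP p I F).1, (pvMergeP p I F).2)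

-- mu_rev accumulation: zeros are skipped only while the accumulator is empty
def pvAppSkip (xs ws : List Int) : List Int :=
  if xs = [] then ws.dropWhile (fun v => v == 0) else xs ++ ws

theorem pv_mem_ascList (q : Nat → Prop) [DecidablePred q] (n : Nat) (x : Int) :
    x ∈ pvAscList q n ↔ ∃ k, k < n ∧ q k ∧ x = (k : Int) + 1 := by
  simp only [pvAscList, List.mem_filterMap, List.mem_range]
  constructor
  · rintro ⟨k, hk, h⟩
    split at h
    · exact ⟨k, hk, ‹_›, (Option.some_inj.mp h).symm⟩
    · cases h
  · rintro ⟨k, hk, hq, rfl⟩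
    exact ⟨k, hk, by simp [hq]⟩

theorem pv_pairwise_ascList (q : Nat → Prop) [DecidablePred q] (n : Nat) :
    (pvAscList q n).Pairwise (· < ·) := by
  rw [pvAscList, List.pairwise_filterMap]
  refine (List.pairwise_lt_range).imp ?_
  intro a b hab x hx y hy
  split at hx <;> split at hy <;> simp_all <;> omega

theorem pv_ascList_succ (q : Nat → Prop) [DecidablePred q] (n : Nat) :
    pvAscList q (n+1) = pvAscList q n ++ (if q n then [(n : Int) + 1] else []) := by
  rw [pvAscList, pvAscList, List.range_succ, List.filterMap_append]
  congr 1
  split_ifs with h <;> simp [List.filterMap_cons, h]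

-- ---- findDelta characterization ----

theorem pv_findDelta_eq (mem : Int → Bool) (d : Nat) (F : List Int)
    (hp : F.Pairwise (· > ·))
    (hF : ∀ x : Int, x ∈ F ↔ 1 ≤ x ∧ x ≤ (d : Int) ∧ mem x = false) :
    pvFindDelta mem d = F.headD 0 := by
  induction d generalizing F with
  | zero =>
    have : F = [] := by
      apply List.eq_nil_iff_forall_not_mem.mpr
      intro x hx
      have := (hF x).mp hx
      omega
    simp [this, pvFindDelta]
  | succ d ih =>
    rw [pvFindDelta]
    by_cases hm : mem ((d : Int) + 1) = true
    · rw [if_pos hm]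
      apply ih F hp
      intro x
      rw [hF x]
      constructor
      · rintro ⟨h1, h2, h3⟩
        refine ⟨h1, ?_, h3⟩
        rcases eq_or_lt_of_le h2 with h | h
        · exfalso; rw [show x = (d : Int) + 1 by push_cast at h ⊢; omega] at h3; simp [hm] at h3
        · push_cast at h ⊢; omega
      · rintro ⟨h1, h2, h3⟩; refine ⟨h1, by push_cast at h2 ⊢; omega, h3⟩
    · rw [if_neg hm]
      have hmem : ((d : Int) + 1) ∈ F := (hF _).mpr ⟨by omega, by push_cast; omega, by simpa using hm⟩
      cases F with
      | nil => simp at hmem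
      | cons y t =>
        have hy : y ≤ (d : Int) + 1 := by
          have := (hF y).mp (List.mem_cons_self ..)
          push_cast at this ⊢; omega
        rcases List.mem_cons.mp hmem with h | h
        · simp [h]
        · exfalso
          have := (List.pairwise_cons.mp hp).1 _ h
          omega

-- ---- the delta loop is the reference greedy ----

theorem pv_mem_dropWhile_desc (i : Int) (F : List Int) (hp : F.Pairwise (· > ·)) (x : Int) :
    x ∈ F.dropWhile (fun f => decide (i ≤ f)) ↔ x ∈ F ∧ x < i := by
  induction F with
  | nil => simp
  | cons f t ih =>
    rw [List.dropWhile_cons]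
    by_cases hif : i ≤ f
    · rw [if_pos (by simpa using hif)]
      rw [ih (List.pairwise_cons.mp hp).2]
      simp only [List.mem_cons]
      constructor
      · rintro ⟨h1, h2⟩; exact ⟨Or.inr h1, h2⟩
      · rintro ⟨h1 | h1, h2⟩
        · omega
        · exact ⟨h1, h2⟩
    · rw [if_neg (by simpa using hif)]
      have hall : ∀ y ∈ f :: t, y < i := by
        intro y hy
        rcases List.mem_cons.mp hy with rfl | hy
        · omega
        · have := (List.pairwise_cons.mp hp).1 y hy; omega
      exact ⟨fun h => ⟨h, hall x h⟩, fun h => h.1⟩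

theorem pv_deltaLoop_merge (abMem : Int → Bool) (I : List Int) :
    ∀ (F used cbar : List Int) (m : Int) (c : Int),
    I.Pairwise (· > ·) → (∀ i ∈ I, 1 ≤ i ∧ i - 1 ≤ c) →
    F.Pairwise (· > ·) →
    (∀ x : Int, x ∈ F ↔ 1 ≤ x ∧ x ≤ c ∧ abMem x = false ∧ used.contains x = false) →
    (pvDeltaLoop abMem I (used, cbar, m)).2.2 = m + ((pvMerge I F).2 : Int) ∧
    (∀ x : Int, x ∈ (pvDeltaLoop abMem I (used, cbar, m)).2.1 ↔ x ∈ cbar ∨ x ∈ (pvMerge I F).1) ∧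
    (∀ x : Int, x ∈ (pvDeltaLoop abMem I (used, cbar, m)).1 ↔ x ∈ used ∨ x ∈ (pvMerge I F).1) := by
  induction I with
  | nil =>
    intro F used cbar m c _ _ _ _
    simp [pvDeltaLoop, pvMerge]
  | cons i I' ih =>
    intro F used cbar m c hpI hb hpF hF
    obtain ⟨hi1, hic⟩ := hb i (List.mem_cons_self ..)
    have hbI' : ∀ i' ∈ I', 1 ≤ i' ∧ i' - 1 ≤ i - 1 := by
      intro i' hi'
      have h1 := (hb i' (List.mem_cons_of_mem _ hi')).1
      have h2 := (List.pairwise_cons.mp hpI).1 i' hi'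
      omega
    have hpI' := (List.pairwise_cons.mp hpI).2
    have hpF' : (F.dropWhile (fun f => decide (i ≤ f))).Pairwise (· > ·) :=
      hpF.sublist (List.dropWhile_sublist _)
    have hF' : ∀ x : Int, x ∈ F.dropWhile (fun f => decide (i ≤ f)) ↔
        1 ≤ x ∧ x ≤ i - 1 ∧ abMem x = false ∧ used.contains x = false := by
      intro x
      rw [pv_mem_dropWhile_desc i F hpF, hF x]
      constructor
      · rintro ⟨⟨h1, h2, h3, h4⟩, h5⟩; exact ⟨h1, by omega, h3, h4⟩
      · rintro ⟨h1, h2, h3, h4⟩; exact ⟨⟨h1, by omega, h3, h4⟩, by omega⟩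
    have hd : pvFindDelta (fun x => abMem x || PySem.Set.contains used x) (i - 1).toNat
        = (F.dropWhile (fun f => decide (i ≤ f))).headD 0 := by
      apply pv_findDelta_eq _ _ _ hpF'
      intro x
      rw [hF' x]
      rw [Int.toNat_of_nonneg (by omega : (0:Int) ≤ i - 1)]
      simp only [Bool.or_eq_false_iff, PySem.Set.contains_eq_listContains]
    simp only [pvDeltaLoop, hd]
    cases hcase : F.dropWhile (fun f => decide (i ≤ f)) with
    | nil =>
      simp only [List.headD_nil, lt_irrefl, if_false]
      have hres := ih [] used cbar (m+1) (i-1) hpI' hbI' (by simp)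
        (by intro x; simp only [List.not_mem_nil, false_iff]
            rintro ⟨h1, h2, h3, h4⟩
            exact absurd ((hF' x).mpr ⟨h1, h2, h3, h4⟩) (by rw [hcase]; simp))
      have hmg : pvMerge (i :: I') F = ((pvMerge I' []).1, (pvMerge I' []).2 + 1) := by
        simp only [pvMerge, hcase]
      rw [hmg]
      refine ⟨?_, hres.2.1, hres.2.2⟩
      rw [hres.1]; push_cast; ring
    | cons f F'' =>
      obtain ⟨hf1, hf2, hf3, hf4⟩ := (hF' f).mp (hcase ▸ List.mem_cons_self ..)
      simp only [List.headD_cons, if_pos (by omega : (0:Int) < f)]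
      have hpF'' : F''.Pairwise (· > ·) := (List.pairwise_cons.mp (hcase ▸ hpF')).2
      have hcontainsAdd : ∀ x : Int, (PySem.Set.add used f).contains x = false ↔
          (used.contains x = false ∧ x ≠ f) := by
        intro x
        rw [show ((PySem.Set.add used f).contains x = false) ↔ x ∉ PySem.Set.add used f by
              simp [List.contains_eq_mem]]
        rw [show ((used.contains x = false)) ↔ x ∉ used by simp [List.contains_eq_mem]]
        rw [PySem.Set.mem_add]
        tauto
      have hFchar'' : ∀ x : Int, x ∈ F'' ↔
          1 ≤ x ∧ x ≤ i - 1 ∧ abMem x = false ∧ (PySem.Set.add used f).contains x = false := by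
        intro x
        have hxF' : x ∈ F'' ↔ (x ∈ F.dropWhile (fun f => decide (i ≤ f)) ∧ x ≠ f) := by
          rw [hcase]
          simp only [List.mem_cons]
          constructor
          · intro h
            refine ⟨Or.inr h, ?_⟩
            have := (List.pairwise_cons.mp (hcase ▸ hpF')).1 x h
            omega
          · rintro ⟨h | h, h2⟩
            · omega
            · exact h
        rw [hxF', hF' x, hcontainsAdd x]
        tauto
      have hres := ih F'' (PySem.Set.add used f) (PySem.Set.add cbar f) m (i-1)
        hpI' hbI' hpF'' hFchar''
      have hmg : pvMerge (i :: I') F = (f :: (pvMerge I' F'').1, (pvMerge I' F'').2) := by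
        simp only [pvMerge, hcase]
      rw [hmg]
      refine ⟨hres.1, ?_, ?_⟩
      · intro x
        rw [hres.2.1 x]
        rw [PySem.Set.mem_add]
        simp only [List.mem_cons]
        tauto
      · intro x
        rw [hres.2.2 x]
        rw [PySem.Set.mem_add]
        simp only [List.mem_cons]
        tauto

-- ---- pvMergeP structure lemmas ----

theorem pv_mergeP_push (i : Int) (I : List Int) (p : Nat) :
    ∀ F : List Int, (∀ f ∈ F, f < i) →
    pvMergeP p (i :: I) F = pvMergeP (p+1) I F := by
  induction p with
  | zero =>
    intro F hF
    cases F with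
    | nil => simp [pvMergeP, pvMerge]
    | cons f F' =>
      have : ¬ (i ≤ f) := not_le.mpr (hF f (List.mem_cons_self ..))
      simp only [pvMergeP, pvMerge, List.dropWhile_cons, decide_eq_true_eq, if_neg this]
  | succ p ih =>
    intro F hF
    cases F with
    | nil => simp only [pvMergeP]; rw [ih [] (by simp)]; simp [pvMergeP]
    | cons f F' =>
      simp only [pvMergeP]
      rw [ih F' (fun g hg => hF g (List.mem_cons_of_mem _ hg))]

theorem pv_merge_drop_top (I : List Int) (F : List Int) (j : Int)
    (h : ∀ i ∈ I, i < j) : pvMerge I (j :: F) = pvMerge I F := by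
  cases I with
  | nil => simp [pvMerge]
  | cons i I' =>
    have hij : i ≤ j := le_of_lt (h i (List.mem_cons_self ..))
    simp only [pvMerge, List.dropWhile_cons, decide_eq_true_eq, if_pos hij]

theorem pv_merge_matched_sub (I : List Int) :
    ∀ F : List Int, ∀ x ∈ (pvMerge I F).1, x ∈ F := by
  induction I with
  | nil => intro F x hx; simp [pvMerge] at hx
  | cons i I' ih =>
    intro F x hx
    have hsub : ∀ y ∈ F.dropWhile (fun f => decide (i ≤ f)), y ∈ F :=
      fun y hy => (List.dropWhile_sublist _).subset hy
    simp only [pvMerge] at hx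
    cases h : F.dropWhile (fun f => decide (i ≤ f)) with
    | nil => rw [h] at hx; simp at hx; exact absurd (ih [] x hx) (by simp)
    | cons f F' =>
      rw [h] at hx
      simp only [List.mem_cons] at hx
      rcases hx with rfl | hx
      · exact hsub x (h ▸ List.mem_cons_self ..)
      · exact hsub x (h ▸ List.mem_cons_of_mem _ (ih F' x hx))

theorem pv_mergeP_matched_sub (p : Nat) (I : List Int) :
    ∀ F : List Int, ∀ x ∈ (pvMergeP p I F).1, x ∈ F := by
  induction p with
  | zero => exact pv_merge_matched_sub I
  | succ p ih =>
    intro F x hx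
    cases F with
    | nil => simp only [pvMergeP] at hx; exact absurd (ih [] x hx) (by simp)
    | cons f F' =>
      simp only [pvMergeP, List.mem_cons] at hx
      rcases hx with rfl | hx
      · exact List.mem_cons_self ..
      · exact List.mem_cons_of_mem _ (ih F' x hx)

-- ---- the scan: statuses and W values ----

-- descending value list written by the sweep from column j down to 1
def pvW (ac bc lc : Array Int) : Nat → Nat → List Int
  | 0, _ => []
  | j+1, p =>
    if lc.getD j 0 > ac.getD j 0 ∧ lc.getD j 0 > bc.getD j 0 then
      (lc.getD j 0 - 1) :: pvW ac bc lc j (p+1)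
    else if lc.getD j 0 > ac.getD j 0 ∨ lc.getD j 0 > bc.getD j 0 then
      (lc.getD j 0 - 1) :: pvW ac bc lc j p
    else if 0 < p then (lc.getD j 0 - 1) :: pvW ac bc lc j (p-1)
    else lc.getD j 0 :: pvW ac bc lc j 0

theorem pv_mergeP_nil (p : Nat) : pvMergeP p ([] : List Int) [] = ([], p) := by
  induction p with
  | zero => simp [pvMergeP, pvMerge]
  | succ p ih => simp [pvMergeP, ih]

theorem pv_appSkip_nil (xs : List Int) : pvAppSkip xs [] = xs := by
  cases xs <;> simp [pvAppSkip]

theorem pv_appSkip_step (muRev : List Int) (w : Int) (ws : List Int) :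
    pvAppSkip (if w ≠ 0 ∨ muRev ≠ [] then muRev ++ [w] else muRev) ws
      = pvAppSkip muRev (w :: ws) := by
  cases muRev with
  | nil =>
    by_cases hw : w = 0
    · subst hw; simp [pvAppSkip, List.dropWhile_cons]
    · simp [pvAppSkip, hw, List.dropWhile_cons]
  | cons c t => simp [pvAppSkip]

def pvIL (ac bc lc : Array Int) (j : Nat) : List Int :=
  (pvAscList (fun k => lc.getD k 0 > ac.getD k 0 ∧ lc.getD k 0 > bc.getD k 0) j).reverse

def pvFL (ac bc lc : Array Int) (j : Nat) : List Int :=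
  (pvAscList (fun k => ¬(lc.getD k 0 > ac.getD k 0 ∨ lc.getD k 0 > bc.getD k 0)) j).reverse

theorem pv_IL_le (ac bc lc : Array Int) (j : Nat) : ∀ x ∈ pvIL ac bc lc j, x ≤ (j : Int) := by
  intro x hx
  rw [pvIL, List.mem_reverse] at hx
  obtain ⟨k, hk, _, rfl⟩ := (pv_mem_ascList _ _ _).mp hx
  push_cast; omega

theorem pv_FL_le (ac bc lc : Array Int) (j : Nat) : ∀ x ∈ pvFL ac bc lc j, x ≤ (j : Int) := by
  intro x hx
  rw [pvFL, List.mem_reverse] at hx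
  obtain ⟨k, hk, _, rfl⟩ := (pv_mem_ascList _ _ _).mp hx
  push_cast; omega

theorem pv_IL_succ (ac bc lc : Array Int) (j : Nat) :
    pvIL ac bc lc (j+1) =
      (if lc.getD j 0 > ac.getD j 0 ∧ lc.getD j 0 > bc.getD j 0 then [((j : Int) + 1)] else [])
        ++ pvIL ac bc lc j := by
  rw [pvIL, pvIL, pv_ascList_succ, List.reverse_append]
  congr 1
  split <;> simp

theorem pv_FL_succ (ac bc lc : Array Int) (j : Nat) :
    pvFL ac bc lc (j+1) =
      (if ¬(lc.getD j 0 > ac.getD j 0 ∨ lc.getD j 0 > bc.getD j 0) then [((j : Int) + 1)] else [])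
        ++ pvFL ac bc lc j := by
  rw [pvFL, pvFL, pv_ascList_succ, List.reverse_append]
  congr 1
  split <;> simp

theorem pv_scan_eq (ac bc lc : Array Int) : ∀ (j : Nat) (p : Nat) (muRev : List Int),
    pvScanCols ac bc lc j ((p : Int), muRev) =
      (((pvMergeP p (pvIL ac bc lc j) (pvFL ac bc lc j)).2 : Int),
       pvAppSkip muRev (pvW ac bc lc j p)) := by
  intro j
  induction j with
  | zero =>
    intro p muRev
    simp [pvScanCols, pvIL, pvFL, pvAscList, pv_mergeP_nil, pv_appSkip_nil, pvW]
  | succ j ih =>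
    intro p muRev
    have hcast1 : ((p : Int) + 1) = ((p + 1 : Nat) : Int) := by push_cast; ring
    have hflt : ∀ f ∈ pvFL ac bc lc j, f < (j : Int) + 1 :=
      fun f hf => by have := pv_FL_le ac bc lc j f hf; omega
    simp only [pvScanCols]
    by_cases hA : lc.getD j 0 > ac.getD j 0 <;> by_cases hB : lc.getD j 0 > bc.getD j 0
    · -- both
      have hIL : pvIL ac bc lc (j+1) = ((j : Int) + 1) :: pvIL ac bc lc j := by
        rw [pv_IL_succ, if_pos (And.intro hA hB), List.singleton_append]
      have hFL : pvFL ac bc lc (j+1) = pvFL ac bc lc j := by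
        rw [pv_FL_succ, if_neg (not_not_intro (Or.inl hA)), List.nil_append]
      have hW : pvW ac bc lc (j+1) p = (lc.getD j 0 - 1) :: pvW ac bc lc j (p+1) := by
        simp only [pvW]; rw [if_pos (And.intro hA hB)]
      rw [if_pos (And.intro hA hB)]
      try dsimp only
      rw [hIL, hFL, pv_mergeP_push _ _ _ _ hflt, hW]
      rw [← pv_appSkip_step muRev (lc.getD j 0 - 1) (pvW ac bc lc j (p+1))]
      rw [hcast1]
      exact ih (p+1) _
    · -- in A only
      have hIL : pvIL ac bc lc (j+1) = pvIL ac bc lc j := by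
        rw [pv_IL_succ, if_neg (fun h => hB h.2), List.nil_append]
      have hFL : pvFL ac bc lc (j+1) = pvFL ac bc lc j := by
        rw [pv_FL_succ, if_neg (not_not_intro (Or.inl hA)), List.nil_append]
      have hW : pvW ac bc lc (j+1) p = (lc.getD j 0 - 1) :: pvW ac bc lc j p := by
        simp only [pvW]; rw [if_neg (fun h => hB h.2), if_pos (Or.inl hA)]
      rw [if_neg (show ¬(lc.getD j 0 > ac.getD j 0 ∧ lc.getD j 0 > bc.getD j 0) from
            fun h => hB h.2), if_pos (Or.inl hA)]
      try dsimp only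
      rw [hIL, hFL, hW]
      rw [← pv_appSkip_step muRev (lc.getD j 0 - 1) (pvW ac bc lc j p)]
      exact ih p _
    · -- in B only
      have hIL : pvIL ac bc lc (j+1) = pvIL ac bc lc j := by
        rw [pv_IL_succ, if_neg (fun h => hA h.1), List.nil_append]
      have hFL : pvFL ac bc lc (j+1) = pvFL ac bc lc j := by
        rw [pv_FL_succ, if_neg (not_not_intro (Or.inr hB)), List.nil_append]
      have hW : pvW ac bc lc (j+1) p = (lc.getD j 0 - 1) :: pvW ac bc lc j p := by
        simp only [pvW]; rw [if_neg (fun h => hA h.1), if_pos (Or.inr hB)]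
      rw [if_neg (show ¬(lc.getD j 0 > ac.getD j 0 ∧ lc.getD j 0 > bc.getD j 0) from
            fun h => hA h.1), if_pos (Or.inr hB)]
      try dsimp only
      rw [hIL, hFL, hW]
      rw [← pv_appSkip_step muRev (lc.getD j 0 - 1) (pvW ac bc lc j p)]
      exact ih p _
    · -- free column
      have hIL : pvIL ac bc lc (j+1) = pvIL ac bc lc j := by
        rw [pv_IL_succ, if_neg (fun h => hA h.1), List.nil_append]
      have hFL : pvFL ac bc lc (j+1) = ((j : Int) + 1) :: pvFL ac bc lc j := by
        rw [pv_FL_succ, if_pos (fun h => h.elim hA hB), List.singleton_append]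
      rw [if_neg (show ¬(lc.getD j 0 > ac.getD j 0 ∧ lc.getD j 0 > bc.getD j 0) from
            fun h => hA h.1),
          if_neg (show ¬(lc.getD j 0 > ac.getD j 0 ∨ lc.getD j 0 > bc.getD j 0) from
            fun h => h.elim hA hB)]
      cases p with
      | zero =>
        have hW : pvW ac bc lc (j+1) 0 = lc.getD j 0 :: pvW ac bc lc j 0 := by
          simp only [pvW]
          rw [if_neg (fun h => hA h.1), if_neg (fun h => h.elim hA hB), if_neg (lt_irrefl 0)]
        rw [if_neg (show ¬((0 : Int) < ((0 : Nat) : Int)) by simp)]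
        try dsimp only
        rw [hIL, hFL]
        rw [show pvMergeP 0 (pvIL ac bc lc j) (((j : Int) + 1) :: pvFL ac bc lc j)
              = pvMerge (pvIL ac bc lc j) (pvFL ac bc lc j) from
            pv_merge_drop_top _ _ _ (fun i hi => by have := pv_IL_le ac bc lc j i hi; omega)]
        rw [hW]
        rw [← pv_appSkip_step muRev (lc.getD j 0) (pvW ac bc lc j 0)]
        exact ih 0 _
      | succ q =>
        have hW : pvW ac bc lc (j+1) (q+1) = (lc.getD j 0 - 1) :: pvW ac bc lc j q := by
          simp only [pvW]
          rw [if_neg (fun h => hA h.1), if_neg (fun h => h.elim hA hB), if_pos (Nat.succ_pos q),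
              Nat.add_sub_cancel]
        rw [if_pos (show (0 : Int) < ((q + 1 : Nat) : Int) by push_cast; omega)]
        try dsimp only
        rw [hIL, hFL]
        rw [show pvMergeP (q+1) (pvIL ac bc lc j) (((j : Int) + 1) :: pvFL ac bc lc j)
              = (((j : Int) + 1) :: (pvMergeP q (pvIL ac bc lc j) (pvFL ac bc lc j)).1,
                 (pvMergeP q (pvIL ac bc lc j) (pvFL ac bc lc j)).2) from rfl]
        rw [hW]
        rw [← pv_appSkip_step muRev (lc.getD j 0 - 1) (pvW ac bc lc j q)]
        rw [show (((q + 1 : Nat) : Int) - 1) = ((q : Nat) : Int) by push_cast; ring]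
        exact ih q _

theorem pv_W_eq (ac bc lc : Array Int) : ∀ (j : Nat) (p : Nat),
    pvW ac bc lc j p =
      (List.range j).reverse.map (fun k => lc.getD k 0 -
        (if (lc.getD k 0 > ac.getD k 0 ∨ lc.getD k 0 > bc.getD k 0 ∨
             ((k : Int) + 1) ∈ (pvMergeP p (pvIL ac bc lc j) (pvFL ac bc lc j)).1)
         then 1 else 0)) := by
  intro j
  induction j with
  | zero => intro p; simp [pvW]
  | succ j ih =>
    intro p
    have hrange : (List.range (j+1)).reverse = j :: (List.range j).reverse := by
      rw [List.range_succ, List.reverse_append]; rfl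
    have hflt : ∀ f ∈ pvFL ac bc lc j, f < (j : Int) + 1 :=
      fun f hf => by have := pv_FL_le ac bc lc j f hf; omega
    rw [hrange, List.map_cons]
    by_cases hA : lc.getD j 0 > ac.getD j 0 <;> by_cases hB : lc.getD j 0 > bc.getD j 0
    · -- both
      have hIL : pvIL ac bc lc (j+1) = ((j : Int) + 1) :: pvIL ac bc lc j := by
        rw [pv_IL_succ, if_pos (And.intro hA hB), List.singleton_append]
      have hFL : pvFL ac bc lc (j+1) = pvFL ac bc lc j := by
        rw [pv_FL_succ, if_neg (not_not_intro (Or.inl hA)), List.nil_append]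
      have hW : pvW ac bc lc (j+1) p = (lc.getD j 0 - 1) :: pvW ac bc lc j (p+1) := by
        simp only [pvW]; rw [if_pos (And.intro hA hB)]
      have hM : pvMergeP p (pvIL ac bc lc (j+1)) (pvFL ac bc lc (j+1))
          = pvMergeP (p+1) (pvIL ac bc lc j) (pvFL ac bc lc j) := by
        rw [hIL, hFL]; exact pv_mergeP_push _ _ _ _ hflt
      rw [hW, hM]
      congr 1
      · rw [if_pos (Or.inl hA)]
      · exact ih (p+1)
    · -- in A only
      have hIL : pvIL ac bc lc (j+1) = pvIL ac bc lc j := by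
        rw [pv_IL_succ, if_neg (fun h => hB h.2), List.nil_append]
      have hFL : pvFL ac bc lc (j+1) = pvFL ac bc lc j := by
        rw [pv_FL_succ, if_neg (not_not_intro (Or.inl hA)), List.nil_append]
      have hW : pvW ac bc lc (j+1) p = (lc.getD j 0 - 1) :: pvW ac bc lc j p := by
        simp only [pvW]; rw [if_neg (fun h => hB h.2), if_pos (Or.inl hA)]
      rw [hW, hIL, hFL]
      congr 1
      · rw [if_pos (Or.inl hA)]
      · exact ih p
    · -- in B only
      have hIL : pvIL ac bc lc (j+1) = pvIL ac bc lc j := by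
        rw [pv_IL_succ, if_neg (fun h => hA h.1), List.nil_append]
      have hFL : pvFL ac bc lc (j+1) = pvFL ac bc lc j := by
        rw [pv_FL_succ, if_neg (not_not_intro (Or.inr hB)), List.nil_append]
      have hW : pvW ac bc lc (j+1) p = (lc.getD j 0 - 1) :: pvW ac bc lc j p := by
        simp only [pvW]; rw [if_neg (fun h => hA h.1), if_pos (Or.inr hB)]
      rw [hW, hIL, hFL]
      congr 1
      · rw [if_pos (Or.inr (Or.inl hB))]
      · exact ih p
    · -- free column
      have hIL : pvIL ac bc lc (j+1) = pvIL ac bc lc j := by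
        rw [pv_IL_succ, if_neg (fun h => hA h.1), List.nil_append]
      have hFL : pvFL ac bc lc (j+1) = ((j : Int) + 1) :: pvFL ac bc lc j := by
        rw [pv_FL_succ, if_pos (fun h => h.elim hA hB), List.singleton_append]
      cases p with
      | zero =>
        have hW : pvW ac bc lc (j+1) 0 = lc.getD j 0 :: pvW ac bc lc j 0 := by
          simp only [pvW]
          rw [if_neg (fun h => hA h.1), if_neg (fun h => h.elim hA hB), if_neg (lt_irrefl 0)]
        have hM : pvMergeP 0 (pvIL ac bc lc (j+1)) (pvFL ac bc lc (j+1))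
            = pvMergeP 0 (pvIL ac bc lc j) (pvFL ac bc lc j) := by
          rw [hIL, hFL]
          exact pv_merge_drop_top _ _ _ (fun i hi => by have := pv_IL_le ac bc lc j i hi; omega)
        rw [hW, hM]
        congr 1
        · rw [if_neg (show ¬(lc.getD j 0 > ac.getD j 0 ∨ lc.getD j 0 > bc.getD j 0 ∨
              ((j : Int) + 1) ∈ (pvMergeP 0 (pvIL ac bc lc j) (pvFL ac bc lc j)).1) by
              rintro (h | h | h)
              · exact hA h
              · exact hB h
              · exact absurd (pv_FL_le ac bc lc j _ (pv_mergeP_matched_sub 0 _ _ _ h)) (by omega))]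
          rw [sub_zero]
        · exact ih 0
      | succ q =>
        have hW : pvW ac bc lc (j+1) (q+1) = (lc.getD j 0 - 1) :: pvW ac bc lc j q := by
          simp only [pvW]
          rw [if_neg (fun h => hA h.1), if_neg (fun h => h.elim hA hB), if_pos (Nat.succ_pos q),
              Nat.add_sub_cancel]
        have hM : pvMergeP (q+1) (pvIL ac bc lc (j+1)) (pvFL ac bc lc (j+1))
            = (((j : Int) + 1) :: (pvMergeP q (pvIL ac bc lc j) (pvFL ac bc lc j)).1,
               (pvMergeP q (pvIL ac bc lc j) (pvFL ac bc lc j)).2) := by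
          rw [hIL, hFL]; rfl
        rw [hW, hM]
        congr 1
        · rw [if_pos (Or.inr (Or.inr (List.mem_cons_self ..)))]
        · rw [ih q]
          refine List.map_congr_left (fun k hk => ?_)
          have hk' : k < j := by rw [List.mem_reverse, List.mem_range] at hk; exact hk
          have hne : ¬(((k : Int) + 1) = ((j : Int) + 1)) := by omega
          have hcond : (lc.getD k 0 > ac.getD k 0 ∨ lc.getD k 0 > bc.getD k 0 ∨
              ((k : Int) + 1) ∈ (pvMergeP q (pvIL ac bc lc j) (pvFL ac bc lc j)).1) ↔
              (lc.getD k 0 > ac.getD k 0 ∨ lc.getD k 0 > bc.getD k 0 ∨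
              ((k : Int) + 1) ∈ (((j : Int) + 1) :: (pvMergeP q (pvIL ac bc lc j) (pvFL ac bc lc j)).1,
                 (pvMergeP q (pvIL ac bc lc j) (pvFL ac bc lc j)).2).1) := by
            simp only [List.mem_cons]
            tauto
          simp only [hcond]

theorem pv_mem_ascList' (q : Nat → Prop) [DecidablePred q] (n k : Nat) (hk : k < n) :
    ((k : Int) + 1) ∈ pvAscList q n ↔ q k := by
  rw [pv_mem_ascList]
  constructor
  · rintro ⟨k', hk', hq, heq⟩
    have : k' = k := by omega
    exact this ▸ hq
  · intro hq
    exact ⟨k, hk, hq, rfl⟩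

theorem pv_nodup_ascList (q : Nat → Prop) [DecidablePred q] (n : Nat) :
    (pvAscList q n).Nodup :=
  (pv_pairwise_ascList q n).imp (fun h => ne_of_lt h)

theorem pv_getD_toArray (l : List Bool) (k : Nat) : l.toArray.getD k false = l.getD k false := by
  rw [Array.getD_eq_getD_getElem?, List.getD_eq_getElem?_getD, List.getElem?_toArray]

set_option maxHeartbeats 2000000 in
theorem pv_main (alpha beta lam : List Int) :
    burge_inverse_rule alpha beta lam = burge_inverse_rule_alt alpha beta lam := by
  have hite : ∀ l : List Int,
      (if l ≠ [] then partition_conjugate_port l else []) = partition_conjugate_port l := by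
    intro l
    by_cases h : l = [] <;> simp [h, partition_conjugate_port]
  simp only [burge_inverse_rule, burge_inverse_rule_alt, hite]
  set ac0 := partition_conjugate_port alpha with hac0
  set bc0 := partition_conjugate_port beta with hbc0
  set lc0 := partition_conjugate_port lam with hlc0
  set n := max (max (max ac0.length bc0.length) lc0.length) 1 with hn
  set ac := ac0 ++ List.replicate (n - ac0.length) 0 with hac
  set bc := bc0 ++ List.replicate (n - bc0.length) 0 with hbc
  set lc := lc0 ++ List.replicate (n - lc0.length) 0 with hlc
  set acA := ac.toArray with hacA
  set bcA := bc.toArray with hbcA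
  set lcA := lc.toArray with hlcA
  -- collapse set(...) comprehensions to their ascending distinct lists
  have hLA : PySem.Set.ofList (List.filterMap
        (fun x : Nat => if lcA.getD x 0 > acA.getD x 0 then some ((x : Int) + 1) else none)
        (List.range n))
      = pvAscList (fun k => lcA.getD k 0 > acA.getD k 0) n :=
    PySem.Set.ofList_eq_self_of_nodup _ (pv_nodup_ascList _ n)
  have hLB : PySem.Set.ofList (List.filterMap
        (fun x : Nat => if lcA.getD x 0 > bcA.getD x 0 then some ((x : Int) + 1) else none)
        (List.range n))
      = pvAscList (fun k => lcA.getD k 0 > bcA.getD k 0) n :=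
    PySem.Set.ofList_eq_self_of_nodup _ (pv_nodup_ascList _ n)
  rw [hLA, hLB]
  -- the sorted intersection is the descending list of doubly-marked columns
  have hint : PySem.List.sorted
      (PySem.Set.inter (pvAscList (fun k => lcA.getD k 0 > acA.getD k 0) n)
        (pvAscList (fun k => lcA.getD k 0 > bcA.getD k 0) n)) (fun x => x) true
      = pvIL acA bcA lcA n := by
    apply PySem.List.sorted_rev_eq_of_perm_of_pairwise_gt
    · rw [List.perm_ext_iff_of_nodup
        (by rw [pvIL]; exact List.nodup_reverse.mpr (pv_nodup_ascList _ n))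
        (PySem.Set.nodup_inter _ _ (pv_nodup_ascList _ n))]
      intro x
      rw [pvIL, List.mem_reverse, PySem.Set.mem_inter]
      constructor
      · intro hx
        obtain ⟨k, hk, ⟨h1, h2⟩, rfl⟩ := (pv_mem_ascList _ _ _).mp hx
        exact ⟨(pv_mem_ascList' _ n k hk).mpr h1, (pv_mem_ascList' _ n k hk).mpr h2⟩
      · rintro ⟨hx1, hx2⟩
        obtain ⟨k, hk, h1, rfl⟩ := (pv_mem_ascList _ _ _).mp hx1
        exact (pv_mem_ascList _ _ _).mpr ⟨k, hk, ⟨h1, (pv_mem_ascList' _ n k hk).mp hx2⟩, rfl⟩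
    · rw [pvIL]
      exact List.pairwise_reverse.mpr ((pv_pairwise_ascList _ n).imp (fun h => h))
  rw [hint]
  -- the flag-array membership agrees with the union set on columns
  have habm : ∀ k : Nat, k < n →
      (((if 1 ≤ ((k : Int) + 1) ∧ ((k : Int) + 1) ≤ (n : Int) then (((List.range n).map
            (fun j => decide (lcA.getD j 0 > acA.getD j 0) || decide (lcA.getD j 0 > bcA.getD j 0))).toArray).getD
          (((k : Int) + 1) - 1).toNat false else false) = false)
      ↔ ¬(lcA.getD k 0 > acA.getD k 0 ∨ lcA.getD k 0 > bcA.getD k 0)) := by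
    intro k hk
    rw [if_pos ⟨by omega, by push_cast; omega⟩]
    rw [show (((k : Int) + 1) - 1).toNat = k by omega]
    rw [pv_getD_toArray, PySem.List.getD_map_range _ _ _ _ hk]
    simp
  -- run the delta loop through the reference greedy
  have hdel := pv_deltaLoop_merge
      (fun x : Int => if 1 ≤ x ∧ x ≤ (n : Int) then (((List.range n).map
                (fun j => decide (lcA.getD j 0 > acA.getD j 0) || decide (lcA.getD j 0 > bcA.getD j 0))).toArray).getD
              (x - 1).toNat false else false)
      (pvIL acA bcA lcA n) (pvFL acA bcA lcA n) PySem.Set.empty PySem.Set.empty 0 (n : Int)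
      (List.pairwise_reverse.mpr ((pv_pairwise_ascList _ n).imp (fun h => h)))
      (by
        intro i hi
        have h2 := pv_IL_le acA bcA lcA n i hi
        rw [pvIL, List.mem_reverse] at hi
        obtain ⟨k, hk, -, rfl⟩ := (pv_mem_ascList _ _ _).mp hi
        omega)
      (List.pairwise_reverse.mpr ((pv_pairwise_ascList _ n).imp (fun h => h)))
      (by
        intro x
        rw [pvFL, List.mem_reverse]
        constructor
        · intro hx
          obtain ⟨k, hk, hfree, rfl⟩ := (pv_mem_ascList _ _ _).mp hx
          exact ⟨by omega, by omega, (habm k hk).mpr hfree, rfl⟩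
        · rintro ⟨h1, h2, h3, -⟩
          obtain ⟨k, hk, rfl⟩ : ∃ k : Nat, k < n ∧ x = (k : Int) + 1 :=
            ⟨(x - 1).toNat, by omega, by omega⟩
          exact (pv_mem_ascList _ _ _).mpr ⟨k, hk, (habm k hk).mp h3, rfl⟩)
  obtain ⟨hm, hC, -⟩ := hdel
  -- the removal map
  have hlen : lcA.size = n := by
    have : lc0.length ≤ n := by rw [hn]; omega
    rw [hlcA, List.size_toArray, hlc, List.length_append, List.length_replicate]
    omega
  rw [hlen, hm]
  have hmap : List.map (fun j : Nat => lcA.getD j 0 -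
        if PySem.Set.contains (PySem.Set.union
            (PySem.Set.union (pvAscList (fun k => lcA.getD k 0 > acA.getD k 0) n)
              (pvAscList (fun k => lcA.getD k 0 > bcA.getD k 0) n))
            (pvDeltaLoop (fun x : Int => if 1 ≤ x ∧ x ≤ (n : Int) then (((List.range n).map
                (fun j => decide (lcA.getD j 0 > acA.getD j 0) || decide (lcA.getD j 0 > bcA.getD j 0))).toArray).getD
              (x - 1).toNat false else false)
              (pvIL acA bcA lcA n) (PySem.Set.empty, PySem.Set.empty, 0)).2.1)
            ((j : Int) + 1) = true
        then 1 else 0) (List.range n)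
      = List.map (fun k : Nat => lcA.getD k 0 -
        if (lcA.getD k 0 > acA.getD k 0 ∨ lcA.getD k 0 > bcA.getD k 0 ∨
            ((k : Int) + 1) ∈ (pvMergeP 0 (pvIL acA bcA lcA n) (pvFL acA bcA lcA n)).1)
        then 1 else 0) (List.range n) := by
    refine List.map_congr_left (fun j hj => ?_)
    have hjn : j < n := List.mem_range.mp hj
    congr 1
    refine if_congr ?_ rfl rfl
    rw [PySem.Set.contains_iff, PySem.Set.mem_union, PySem.Set.mem_union, hC,
        pv_mem_ascList' _ n j hjn, pv_mem_ascList' _ n j hjn]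
    have : (((j : Int) + 1) ∈ (PySem.Set.empty : PySem.Set Int)) ↔ False := by
      simp [PySem.Set.empty]
    rw [this]
    rw [show (pvMergeP 0 (pvIL acA bcA lcA n) (pvFL acA bcA lcA n))
          = pvMerge (pvIL acA bcA lcA n) (pvFL acA bcA lcA n) from rfl]
    tauto
  rw [hmap]
  -- the B side sweep
  rw [show (pvScanCols acA bcA lcA n (0, []))
        = (((pvMergeP 0 (pvIL acA bcA lcA n) (pvFL acA bcA lcA n)).2 : Int),
           pvAppSkip [] (pvW acA bcA lcA n 0)) from pv_scan_eq acA bcA lcA n 0 []]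
  rw [pv_W_eq acA bcA lcA n 0]
  rw [show pvAppSkip ([] : List Int) = fun ws => ws.dropWhile (fun v => v == 0) from by
        funext ws; simp [pvAppSkip]]
  rw [← List.map_reverse]
  rw [zero_add]
  rfl
-- ===== VERDICT (by name: the statement is the Claim_ definition above) =====
theorem burge_inverse_rule_spec : Claim_equal_burge_inverse_rule := by
  intro alpha beta lam _
  show _ = _
  exact pv_main alpha beta lam
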